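-- pv_equiv track=rewrite | github.com/c50bossio/6fb-booking | backend-v2/services/seo_optimization_service.py | _select_best_local_phrase
-- ===== SOURCE A (Python) =====
-- from typing import Dict, List, Optional, Tuple, Any, Set
--
-- def _select_best_local_phrase(local_phrases: List[str], keywords: List[str]) -> str:
--     """Select the best local phrase based on keyword relevance"""
--     if not local_phrases:
--         return ""
--
--     # Score phrases based on keyword overlap
--     scored_phrases = []
--
--     for phrase in local_phrases:
--         score = 0
--         phrase_lower = phrase.lower()
--
--         for keyword in keywords:
--             if keyword.lower() in phrase_lower:
--                 score += 1
--
--         scored_phrases.append((phrase, score))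
--
--     # Return highest scoring phrase
--     sorted_phrases = sorted(scored_phrases, key=lambda x: x[1], reverse=True)
--     return sorted_phrases[0][0] if sorted_phrases else local_phrases[0]
-- ===== SOURCE B (Python) =====
-- def _select_best_local_phrase(local_phrases, keywords):
--     """Select the best local phrase based on keyword relevance"""
--     if not local_phrases:
--         return ""
--     best_phrase = ""
--     best_score = -1
--     for phrase in local_phrases:
--         phrase_lower = phrase.lower()
--         score = len([k for k in keywords if k.lower() in phrase_lower])
--         if best_score < score:
--             best_phrase = phrase
--             best_score = score
--     return best_phrase
-- ===== Notes on version B (the rewrite author's own statement) =====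
-- stated objective: simpler
-- what changed: Replaced the scored_phrases list plus stable reverse sort-and-take-head with a single pass that keeps the running best phrase/score, updating only on a strictly greater score (which matches the stable sort's first-maximum tie-break).
import Mathlib
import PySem

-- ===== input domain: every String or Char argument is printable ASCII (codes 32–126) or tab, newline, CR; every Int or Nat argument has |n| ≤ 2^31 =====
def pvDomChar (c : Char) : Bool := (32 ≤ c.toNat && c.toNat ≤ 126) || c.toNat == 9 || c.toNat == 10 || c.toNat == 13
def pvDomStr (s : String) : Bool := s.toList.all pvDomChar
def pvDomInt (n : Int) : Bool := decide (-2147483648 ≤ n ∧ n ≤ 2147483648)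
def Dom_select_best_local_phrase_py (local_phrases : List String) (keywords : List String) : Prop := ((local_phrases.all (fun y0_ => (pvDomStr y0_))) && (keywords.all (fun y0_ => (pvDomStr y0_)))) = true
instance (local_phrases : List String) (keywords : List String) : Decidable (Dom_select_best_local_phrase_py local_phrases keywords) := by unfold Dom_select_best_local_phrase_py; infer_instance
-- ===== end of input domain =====

-- B replaces A's intermediate scored list + stable reverse sort with one pass keeping the
-- running best (strict-improvement update = the stable sort's first-maximum tie-break); simpler.

-- ===== PORT A =====
def select_best_local_phrase_py (local_phrases : List String) (keywords : List String) : String :=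
  if local_phrases = [] then ""
  else
    let scored_phrases : List (String × Int) := local_phrases.foldl (fun acc phrase =>
      let phrase_lower := PySem.Str.lower phrase
      let score := keywords.foldl (fun score keyword =>
        if PySem.Str.isIn (PySem.Str.lower keyword) phrase_lower then score + 1 else score) (0 : Int)
      acc ++ [(phrase, score)]) []
    let sorted_phrases := PySem.List.sorted scored_phrases (fun x => x.2) true
    -- 'sorted_phrases[0][0] if sorted_phrases else local_phrases[0]'; the else arm reads
    -- local_phrases[0], which exists here since local_phrases ≠ []
    match sorted_phrases with
    | p :: _ => p.1
    | [] => local_phrases.headD ""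

-- ===== PORT B =====
def select_best_local_phrase_py_alt (local_phrases : List String) (keywords : List String) : String :=
  if local_phrases = [] then ""
  else
    (local_phrases.foldl (fun best phrase =>
      let phrase_lower := PySem.Str.lower phrase
      let score : Int := (keywords.filter (fun k => PySem.Str.isIn (PySem.Str.lower k) phrase_lower)).length
      if best.2 < score then (phrase, score) else best) (("", -1) : String × Int)).1

-- ===== PRECONDITION & SPEC =====
def Spec_select_best_local_phrase_py (local_phrases : List String) (keywords : List String) (out : String) : Prop := out = select_best_local_phrase_py_alt local_phrases keywords
instance (local_phrases : List String) (keywords : List String) (out : String) : Decidable (Spec_select_best_local_phrase_py local_phrases keywords out) := by unfold Spec_select_best_local_phrase_py; infer_instance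

-- ===== CLAIM (what is proved, stated in full; the proofs are below) =====
def Claim_equal_select_best_local_phrase_py : Prop := ∀ (local_phrases : List String) (keywords : List String), Dom_select_best_local_phrase_py local_phrases keywords → Spec_select_best_local_phrase_py local_phrases keywords (select_best_local_phrase_py local_phrases keywords)

-- ===== LEMMAS AND PROOFS =====

-- A's counting fold equals B's filter length.
theorem count_fold_eq_filter_length (ks : List String) (c : String → Bool) :
    ∀ (init : Int), ks.foldl (fun s k => if c k then s + 1 else s) init
      = init + ((ks.filter c).length : Int) := by
  induction ks with
  | nil => intro init; simp
  | cons k ks ih =>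
    intro init
    by_cases h : c k = true <;> simp [h, ih] <;> omega

-- A's append-accumulating fold builds the map.
theorem foldl_append_singleton_eq_map {α β : Type} (g : α → β) :
    ∀ (ps : List α) (acc : List β),
      ps.foldl (fun acc p => acc ++ [g p]) acc = acc ++ ps.map g := by
  intro ps
  induction ps with
  | nil => simp
  | cons p ps ih => intro acc; simp [ih]

theorem head?_insertBy {α : Type} (before : α → α → Bool) (x : α) (ys : List α) :
    (PySem.List.insertBy before x ys).head?
      = some (match ys with | [] => x | y :: _ => if before x y then x else y) := by
  cases ys with
  | nil => simp [PySem.List.insertBy]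
  | cons y t =>
    by_cases h : before x y = true <;> simp [PySem.List.insertBy, h]

-- head of the stable reverse sort = the strict-improvement scan (scores are ≥ 0, seed is -1)
theorem head_sorted_rev_eq_scan (f : String → Int) (hf : ∀ p, 0 ≤ f p) :
    ∀ (ps : List String), ps ≠ [] →
      (PySem.List.sorted (ps.map (fun p => (p, f p))) (fun x : String × Int => x.2) true).head?
        = some (ps.foldl (fun best phrase =>
            if best.2 < f phrase then (phrase, f phrase) else best) (("", -1) : String × Int)) := by
  intro ps
  induction ps using List.reverseRecOn with
  | nil => intro h; exact absurd rfl h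
  | append_singleton ps x ih =>
    intro _
    rw [PySem.List.sorted_rev_eq_foldl_insertBy, List.map_append, List.foldl_append,
        List.foldl_append]
    by_cases hnil : ps = []
    case pos =>
      subst hnil
      simp [head?_insertBy]
      have := hf x
      omega
    case neg =>
      have ih' := ih hnil
      rw [PySem.List.sorted_rev_eq_foldl_insertBy] at ih'
      set sorted := ps.map (fun p => (p, f p)) |>.foldl
        (fun acc y => PySem.List.insertBy (fun a b => decide (b.2 < a.2)) y acc) [] with hs
      set best := ps.foldl (fun best phrase =>
        if best.2 < f phrase then (phrase, f phrase) else best) (("", -1) : String × Int) with hb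
      cases hsorted : sorted with
      | nil => simp [hsorted] at ih'
      | cons m t =>
        have hm : m = best := by simpa [hsorted] using ih'
        subst hm
        simp only [List.map_cons, List.map_nil, List.foldl_cons, List.foldl_nil]
        rw [head?_insertBy]
        by_cases h : best.2 < f x <;> simp [h]

-- ===== VERDICT (by name: the statement is the Claim_ definition above) =====
theorem select_best_local_phrase_py_spec : Claim_equal_select_best_local_phrase_py := by
  unfold Claim_equal_select_best_local_phrase_py
  intro ps ks _
  unfold Spec_select_best_local_phrase_py select_best_local_phrase_py select_best_local_phrase_py_alt
  by_cases hps : ps = []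
  · simp [hps]
  · simp only [if_neg hps]
    set f : String → Int := fun p =>
      ((ks.filter (fun k => PySem.Str.isIn (PySem.Str.lower k) (PySem.Str.lower p))).length : Int)
      with hfdef
    have hf : ∀ p, 0 ≤ f p := fun p => Int.natCast_nonneg _
    have hA : ps.foldl (fun acc phrase =>
        acc ++ [(phrase, ks.foldl (fun score keyword =>
          if PySem.Str.isIn (PySem.Str.lower keyword) (PySem.Str.lower phrase)
          then score + 1 else score) (0 : Int))]) []
        = ps.map (fun p => (p, f p)) := by
      have : ∀ phrase, (ks.foldl (fun score keyword =>
          if PySem.Str.isIn (PySem.Str.lower keyword) (PySem.Str.lower phrase)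
          then score + 1 else score) (0 : Int)) = f phrase := by
        intro phrase
        rw [count_fold_eq_filter_length ks
          (fun k => PySem.Str.isIn (PySem.Str.lower k) (PySem.Str.lower phrase)) 0]
        simp [hfdef]
      simp only [this]
      simpa using foldl_append_singleton_eq_map (fun p => (p, f p)) ps []
    have hhead := head_sorted_rev_eq_scan f hf ps hps
    rw [← hA] at hhead
    cases hsorted : PySem.List.sorted (ps.foldl (fun acc phrase =>
        acc ++ [(phrase, ks.foldl (fun score keyword =>
          if PySem.Str.isIn (PySem.Str.lower keyword) (PySem.Str.lower phrase)
          then score + 1 else score) (0 : Int))]) []) (fun x => x.2) true with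
    | nil => rw [hsorted] at hhead; simp at hhead
    | cons m t =>
      rw [hsorted] at hhead
      simp only [List.head?_cons, Option.some.injEq] at hhead
      simp [hhead, hfdef]
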